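-- pv_equiv track=rewrite | github.com/cholakova99/Dungeons-and-Pythons | dungeon.py | correct_form
-- ===== SOURCE A (Python) =====
-- allowed_symbols_for_map = ["#", "S", "T", "E", ".", "G"]
--
-- def correct_form(to_be_lines):
--     first_line_len = len(to_be_lines[0])
--     for i in range(0, len(to_be_lines) - 1):
--         if len(to_be_lines[i]) != first_line_len:
--             return False
--         for j in range(first_line_len):
--             if to_be_lines[i][j] not in allowed_symbols_for_map:
--                 return False
--     return True
-- ===== SOURCE B (Python) =====
-- allowed_symbols_for_map = ["#", "S", "T", "E", ".", "G"]
--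
-- def correct_form(to_be_lines):
--     first_line_len = len(to_be_lines[0])
--     lines = to_be_lines[:-1]
--     if any(len(line) != first_line_len for line in lines):
--         return False
--     used = set().union(*lines)
--     return used <= set(allowed_symbols_for_map)
-- ===== Notes on version B (the rewrite author's own statement) =====
-- stated objective: simpler
-- what changed: Replaces A's index-based nested loops with per-cell membership tests by a whole-list length pass over the [:-1] slice followed by aggregating all characters into one set and a single subset test against the allowed-symbol set.
import Mathlib
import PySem

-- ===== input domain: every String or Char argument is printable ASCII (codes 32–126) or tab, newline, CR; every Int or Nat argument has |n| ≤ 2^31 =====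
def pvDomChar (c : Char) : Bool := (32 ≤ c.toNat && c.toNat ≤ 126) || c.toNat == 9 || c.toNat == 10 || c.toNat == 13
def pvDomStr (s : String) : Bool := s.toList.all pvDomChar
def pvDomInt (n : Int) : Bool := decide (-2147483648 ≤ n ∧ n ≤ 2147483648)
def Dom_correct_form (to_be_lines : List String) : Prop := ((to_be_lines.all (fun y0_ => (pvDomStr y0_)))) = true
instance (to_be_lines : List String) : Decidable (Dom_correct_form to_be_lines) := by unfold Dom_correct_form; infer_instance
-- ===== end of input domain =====

-- B replaces A's index-based nested membership loops by a length pass over the [:-1] slice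
-- plus one aggregated character set and a single subset test (simpler decomposition).

-- ===== PORT A =====
-- allowed_symbols_for_map: 1-char strings; modelled exactly by their characters
def pvAllowedA : List Char := ['#', 'S', 'T', 'E', '.', 'G']

def correct_form (to_be_lines : List String) : Bool :=
  match PySem.List.pyGet? to_be_lines 0 with
  | none => false                      -- IndexError in Python: excluded by Pre_
  | some first =>
    let first_line_len : Int := (first.toList.length : Int)
    (PySem.List.pyRange 0 ((to_be_lines.length : Int) - 1) 1).all (fun i =>
      let line := (PySem.List.pyGetD to_be_lines i "").toList
      decide ((line.length : Int) = first_line_len) &&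
        (PySem.List.pyRange 0 first_line_len 1).all (fun j =>
          match PySem.List.pyGet? line j with
          | none => false              -- unreachable: j < first_line_len = len(line)
          | some c => pvAllowedA.contains c))

-- ===== PORT B =====
def pvAllowedB : PySem.Set Char := PySem.Set.ofList ['#', 'S', 'T', 'E', '.', 'G']

def correct_form_alt (to_be_lines : List String) : Bool :=
  match PySem.List.pyGet? to_be_lines 0 with
  | none => false                      -- IndexError in Python: excluded by Pre_
  | some first =>
    let first_line_len := first.toList.length
    let lines := PySem.List.slice to_be_lines none (some (-1))
    if lines.any (fun l => l.toList.length ≠ first_line_len) then false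
    else
      let used := lines.foldl (fun s l => PySem.Set.update s l.toList) PySem.Set.empty
      PySem.Set.issubset used pvAllowedB

-- ===== PRECONDITION & SPEC =====
-- Pre_ excludes only the empty list, on which Python A raises IndexError at to_be_lines[0].
def Pre_correct_form (to_be_lines : List String) : Prop := to_be_lines ≠ []
instance (to_be_lines : List String) : Decidable (Pre_correct_form to_be_lines) := by
  unfold Pre_correct_form; infer_instance

def pvWitness_correct_form : List String := ["#S", "TE"]

def Spec_correct_form (to_be_lines : List String) (out : Bool) : Prop := out = correct_form_alt to_be_lines
instance (to_be_lines : List String) (out : Bool) : Decidable (Spec_correct_form to_be_lines out) := by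
  unfold Spec_correct_form; infer_instance

-- ===== CLAIM (what is proved, stated in full; the proofs are below) =====
def Claim_equal_correct_form : Prop := ∀ (to_be_lines : List String), Dom_correct_form to_be_lines → Pre_correct_form to_be_lines → Spec_correct_form to_be_lines (correct_form to_be_lines)

-- ===== LEMMAS AND PROOFS =====

-- pyGet? at a valid Nat index (no named prelude lemma; unfolded per the PYSEM.md guidance)
theorem pvGet_nat {α : Type} (xs : List α) (k : Nat) (h : k < xs.length) :
    PySem.List.pyGet? xs (k : Int) = some (xs[k]'h) := by
  simp [PySem.List.pyGet?, PySem.List.pyIdx?, h]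

-- A's inner index loop over a line of exactly first_line_len characters is a per-character check
theorem pvInnerA (cs : List Char) :
    ((PySem.List.pyRange 0 (cs.length : Int) 1).all (fun j =>
      match PySem.List.pyGet? cs j with
      | none => false
      | some c => pvAllowedA.contains c)) = cs.all (fun c => pvAllowedA.contains c) := by
  rw [Bool.eq_iff_iff]
  simp only [List.all_eq_true, PySem.List.mem_pyRange_one]
  constructor
  · intro h c hc
    obtain ⟨k, hk, rfl⟩ := List.mem_iff_getElem.mp hc
    have := h (k : Int) ⟨by positivity, by exact_mod_cast hk⟩
    rwa [pvGet_nat cs k hk] at this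
  · intro h j hj
    have hk : j.toNat < cs.length := by omega
    have hj' : j = (j.toNat : Int) := by omega
    rw [hj', pvGet_nat cs j.toNat hk]
    exact h _ (List.getElem_mem hk)

-- A's outer index loop runs exactly over the lines of the [:-1] slice
theorem pvBridge (xs : List String) (P : String → Prop) :
    (∀ i : Int, 0 ≤ i ∧ i < (xs.dropLast.length : Int) → P (PySem.List.pyGetD xs i "")) ↔
      ∀ l ∈ xs.dropLast, P l := by
  constructor
  · intro h l hl
    obtain ⟨k, hk, rfl⟩ := List.mem_iff_getElem.mp hl
    have hk1 : k < xs.length - 1 := by simpa using hk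
    have hk2 : k < xs.length := by omega
    have := h (k : Int) ⟨by positivity, by omega⟩
    rw [PySem.List.pyGetD_natCast, List.getD_eq_getElem xs "" hk2] at this
    rwa [List.getElem_dropLast]
  · intro h i hi
    have hk : i.toNat < xs.length - 1 := by
      have := hi.2; simp [List.length_dropLast] at this; omega
    have hk2 : i.toNat < xs.length := by omega
    have hi' : i = (i.toNat : Int) := by omega
    rw [hi', PySem.List.pyGetD_natCast, List.getD_eq_getElem xs "" hk2]
    have : xs[i.toNat] = (xs.dropLast)[i.toNat]'(by simpa using hk) := by
      rw [List.getElem_dropLast]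
    rw [this]
    exact h _ (List.getElem_mem _)

-- membership in B's aggregated character set
theorem pvMemUsed (lines : List String) (s : PySem.Set Char) (c : Char) :
    (c ∈ lines.foldl (fun s l => PySem.Set.update s l.toList) s) ↔
      c ∈ s ∨ ∃ l ∈ lines, c ∈ l.toList := by
  induction lines generalizing s with
  | nil => simp
  | cons hd tl ih => simp [List.foldl_cons, ih, PySem.Set.mem_update]; tauto

theorem correct_form_spec : Claim_equal_correct_form := by
  intro xs _ hpre
  unfold Pre_correct_form at hpre
  unfold Spec_correct_form correct_form correct_form_alt
  have hlen : 0 < xs.length := List.length_pos_iff.mpr hpre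
  have h0 : PySem.List.pyGet? xs (0 : Int) = some (xs[0]'hlen) := by
    have := pvGet_nat xs 0 hlen
    simpa using this
  rw [h0]
  simp only [PySem.List.slice_to_neg_one]
  rw [Bool.eq_iff_iff]
  have hb : ((xs.length : Int) - 1) = ((xs.dropLast.length : Nat) : Int) := by
    simp [List.length_dropLast]; omega
  rw [hb]
  constructor
  · intro hA
    simp only [List.all_eq_true, PySem.List.mem_pyRange_one] at hA
    have hmid := (pvBridge xs (fun l =>
      (decide ((l.toList.length : Int) = ((xs[0]'hlen).toList.length : Int)) &&
        (PySem.List.pyRange 0 ((xs[0]'hlen).toList.length : Int) 1).all (fun j =>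
          match PySem.List.pyGet? l.toList j with
          | none => false
          | some c => pvAllowedA.contains c)) = true)).mp hA
    simp only [Bool.and_eq_true, decide_eq_true_eq] at hmid
    have hlenOK : ∀ l ∈ xs.dropLast, l.toList.length = (xs[0]'hlen).toList.length := by
      intro l hl; exact_mod_cast (hmid l hl).1
    have hchars : ∀ l ∈ xs.dropLast, ∀ c ∈ l.toList, c ∈ pvAllowedA := by
      intro l hl c hc
      have h2 := (hmid l hl).2
      rw [← Nat.cast_inj (R := Int) |>.mpr (hlenOK l hl), pvInnerA] at h2
      simp only [List.all_eq_true, List.contains_iff_mem] at h2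
      exact h2 c hc
    by_cases hany : (xs.dropLast.any fun l => decide (l.toList.length ≠ (xs[0]'hlen).toList.length)) = true
    · exfalso
      simp only [List.any_eq_true, decide_eq_true_eq] at hany
      obtain ⟨l, hl, hne⟩ := hany
      exact hne (hlenOK l hl)
    · rw [if_neg hany]
      rw [PySem.Set.issubset_iff]
      intro c hc
      rw [pvMemUsed] at hc
      obtain hc | ⟨l, hl, hcl⟩ := hc
      · simp [PySem.Set.empty] at hc
      have := hchars l hl c hcl
      simpa [pvAllowedB, PySem.Set.mem_ofList, pvAllowedA] using this
  · intro hB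
    by_cases hany : (xs.dropLast.any fun l => decide (l.toList.length ≠ (xs[0]'hlen).toList.length)) = true
    · rw [if_pos hany] at hB
      exact absurd hB (by simp)
    · rw [if_neg hany] at hB
      simp only [List.any_eq_true, decide_eq_true_eq] at hany
      have hlenOK : ∀ l ∈ xs.dropLast, l.toList.length = (xs[0]'hlen).toList.length := by
        intro l hl
        by_contra hne
        exact hany ⟨l, hl, hne⟩
      have hchars : ∀ l ∈ xs.dropLast, ∀ c ∈ l.toList, c ∈ pvAllowedA := by
        intro l hl c hc
        have := (PySem.Set.issubset_iff _ _).mp hB c ((pvMemUsed _ _ _).mpr (Or.inr ⟨l, hl, hc⟩))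
        simpa [pvAllowedB, PySem.Set.mem_ofList, pvAllowedA] using this
      simp only [List.all_eq_true, PySem.List.mem_pyRange_one]
      refine (pvBridge xs (fun l =>
        (decide ((l.toList.length : Int) = ((xs[0]'hlen).toList.length : Int)) &&
          (PySem.List.pyRange 0 ((xs[0]'hlen).toList.length : Int) 1).all (fun j =>
            match PySem.List.pyGet? l.toList j with
            | none => false
            | some c => pvAllowedA.contains c)) = true)).mpr ?_
      intro l hl
      simp only [Bool.and_eq_true, decide_eq_true_eq]
      refine ⟨by exact_mod_cast hlenOK l hl, ?_⟩
      rw [show ((xs[0]'hlen).toList.length : Int) = (l.toList.length : Int) from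
        by exact_mod_cast (hlenOK l hl).symm, pvInnerA]
      simp only [List.all_eq_true, List.contains_iff_mem]
      intro c hc
      exact hchars l hl c hc
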